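-- pv_equiv track=rewrite | github.com/Aditya-A-garwal/AgAVRDisassembler | agAVRDisas.py | bitMatch
-- ===== SOURCE A (Python) =====
-- def bitMatch (pNum, pPattern):
--
--     for c in pPattern[::-1]:
--
--         x = ord (c) - 48
--
--         if (pNum & 1) == x or (x != 0 and x != 1):
--             pNum >>= 1
--             continue
--         else:
--             return False
--
--     return True
-- ===== SOURCE B (Python) =====
-- def bitMatch(pNum, pPattern):
--     mask = 0
--     value = 0
--     for c in pPattern:
--         mask = mask * 2
--         value = value * 2
--         if c == '0' or c == '1':
--             mask = mask + 1
--             if c == '1':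
--                 value = value + 1
--     return (pNum & mask) == value
-- ===== Notes on version B (the rewrite author's own statement) =====
-- stated objective: alternative
-- what changed: B builds two integers in one pass over the pattern (mask of literal-bit positions, value of '1' positions) and decides the match with a single masked comparison (pNum & mask) == value, instead of A's per-character compare-and-shift loop with early returns.
import Mathlib
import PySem

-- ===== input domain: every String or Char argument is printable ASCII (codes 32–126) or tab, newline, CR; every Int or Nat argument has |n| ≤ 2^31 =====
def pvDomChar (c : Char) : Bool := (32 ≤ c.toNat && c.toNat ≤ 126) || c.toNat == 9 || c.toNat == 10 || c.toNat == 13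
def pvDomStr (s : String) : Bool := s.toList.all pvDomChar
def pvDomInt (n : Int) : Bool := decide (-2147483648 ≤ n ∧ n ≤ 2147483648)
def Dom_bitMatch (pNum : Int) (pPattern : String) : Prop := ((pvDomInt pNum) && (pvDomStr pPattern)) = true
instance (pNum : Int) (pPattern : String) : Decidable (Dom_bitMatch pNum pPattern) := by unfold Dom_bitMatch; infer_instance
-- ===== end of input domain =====

-- B replaces A's per-character compare-and-shift loop (early returns) by building a mask/value
-- pair in one pass and deciding the match with a single masked comparison (alternative algorithm).


-- ===== PORT A =====
-- the 'for c in pPattern[::-1]' loop: pNum is the mutated loop variable, early 'return False' = false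
def bitMatchLoop (pNum : Int) (cs : List Char) : Bool :=
  match cs with
  | [] => true
  | c :: rest =>
    let x : Int := (c.toNat : Int) - 48
    if PySem.Int.band pNum 1 = x ∨ (x ≠ 0 ∧ x ≠ 1) then bitMatchLoop (pNum >>> (1:Nat)) rest
    else false

-- pPattern[::-1] = PySem.Str.slice? … (-1); step -1 is never 0 so the slice is always 'some' (getD unwraps)
def bitMatch (pNum : Int) (pPattern : String) : Bool :=
  bitMatchLoop pNum ((PySem.Str.slice? pPattern none none (-1)).getD "").toList

-- ===== PORT B =====
def altStep (mv : Int × Int) (c : Char) : Int × Int :=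
  let mask := mv.1 * 2
  let value := mv.2 * 2
  if c = '0' ∨ c = '1' then (mask + 1, if c = '1' then value + 1 else value)
  else (mask, value)

def bitMatch_alt (pNum : Int) (pPattern : String) : Bool :=
  let mv := pPattern.toList.foldl altStep (0, 0)
  PySem.Int.band pNum mv.1 == mv.2

-- ===== PRECONDITION & SPEC =====
def Spec_bitMatch (pNum : Int) (pPattern : String) (out : Bool) : Prop := out = bitMatch_alt pNum pPattern
instance (pNum : Int) (pPattern : String) (out : Bool) : Decidable (Spec_bitMatch pNum pPattern out) := by unfold Spec_bitMatch; infer_instance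

-- ===== CLAIM (what is proved, stated in full; the proofs are below) =====
def Claim_equal_bitMatch : Prop := ∀ (pNum : Int) (pPattern : String), Dom_bitMatch pNum pPattern → Spec_bitMatch pNum pPattern (bitMatch pNum pPattern)

-- ===== LEMMAS AND PROOFS =====

-- little-endian mask/value of a character list (head = least significant bit)
def maskR : List Char → Int
  | [] => 0
  | c :: cs => (if c = '0' ∨ c = '1' then 1 else 0) + 2 * maskR cs

def valR : List Char → Int
  | [] => 0
  | c :: cs => (if c = '1' then 1 else 0) + 2 * valR cs

theorem maskR_nonneg (cs : List Char) : 0 ≤ maskR cs := by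
  induction cs with
  | nil => simp [maskR]
  | cons c cs ih => simp only [maskR]; split <;> omega

theorem valR_nonneg (cs : List Char) : 0 ≤ valR cs := by
  induction cs with
  | nil => simp [valR]
  | cons c cs ih => simp only [valR]; split <;> omega

theorem maskR_append (xs : List Char) (c : Char) :
    maskR (xs ++ [c]) = maskR xs + (if c = '0' ∨ c = '1' then 1 else 0) * 2 ^ xs.length := by
  induction xs with
  | nil => simp [maskR]
  | cons d xs ih => simp only [List.cons_append, maskR, ih, List.length_cons]; ring

theorem valR_append (xs : List Char) (c : Char) :
    valR (xs ++ [c]) = valR xs + (if c = '1' then 1 else 0) * 2 ^ xs.length := by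
  induction xs with
  | nil => simp [valR]
  | cons d xs ih => simp only [List.cons_append, valR, ih, List.length_cons]; ring

-- B's fold, run from an arbitrary state
theorem foldB (l : List Char) (m v : Int) :
    l.foldl altStep (m, v) = (m * 2 ^ l.length + maskR l.reverse, v * 2 ^ l.length + valR l.reverse) := by
  induction l generalizing m v with
  | nil => simp [maskR, valR]
  | cons c cs ih =>
    have hstep : altStep (m, v) c
        = (m * 2 + (if c = '0' ∨ c = '1' then 1 else 0), v * 2 + (if c = '1' then 1 else 0)) := by
      by_cases h1 : c = '1'
      · simp [altStep, h1]
      · by_cases h0 : c = '0'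
        · simp [altStep, h0]
        · simp [altStep, h0, h1]
    rw [List.foldl_cons, hstep, ih, List.reverse_cons, maskR_append, valR_append,
      Prod.mk.injEq, List.length_reverse, List.length_cons]
    constructor <;> ring

-- Nat recurrence for bitwise and
theorem natN (x y : Nat) : x &&& y = (x % 2) * (y % 2) + 2 * ((x / 2) &&& (y / 2)) := by
  conv_lhs => rw [← Nat.bit_testBit_zero_shiftRight_one x, ← Nat.bit_testBit_zero_shiftRight_one y]
  show Nat.bitwise and _ _ = _
  rw [Nat.bitwise_bit]
  simp only [HAnd.hAnd, AndOp.and, Nat.land, Nat.bit, Nat.testBit_zero, Nat.shiftRight_one]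
  rcases Nat.mod_two_eq_zero_or_one x with h | h <;> rcases Nat.mod_two_eq_zero_or_one y with h' | h' <;>
    simp [h, h'] <;> omega

theorem shiftR_one (n : Int) : n >>> (1:Nat) = n / 2 := by
  rw [Int.shiftRight_eq_div_pow]; norm_num

theorem bandneg (n X : Int) (hn : ¬ 0 ≤ n) (hX : 0 ≤ X) :
    PySem.Int.band n X = ((X.toNat : Int) - ((X.toNat &&& (-n-1).toNat : Nat) : Int)) := by
  rw [PySem.Int.band_comm]
  simp only [PySem.Int.band, if_pos hX, if_neg hn]
  have := Nat.and_le_left (n := X.toNat) (m := (-n-1).toNat)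
  omega

-- the key recurrence: and-ing with b + 2*M splits into the low bit and the shifted rest
theorem K1 (n M b : Int) (hM : 0 ≤ M) (hb : b = 0 ∨ b = 1) :
    PySem.Int.band n (b + 2*M) = PySem.Int.band n b + 2 * PySem.Int.band (n >>> (1:Nat)) M := by
  rw [shiftR_one]
  by_cases hn : 0 ≤ n
  · have h2 : (0:Int) ≤ n / 2 := by omega
    rw [PySem.Int.band_of_nonneg hn (by omega), PySem.Int.band_of_nonneg hn (by omega),
        PySem.Int.band_of_nonneg h2 hM]
    have e1 : (b + 2*M).toNat = b.toNat + 2 * M.toNat := by omega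
    have e2 : (n / 2).toNat = n.toNat / 2 := by omega
    rw [e1, e2, natN n.toNat (b.toNat + 2 * M.toNat)]
    have e3 : (b.toNat + 2 * M.toNat) % 2 = b.toNat := by omega
    have e4 : (b.toNat + 2 * M.toNat) / 2 = M.toNat := by omega
    rw [e3, e4]
    have e5 : n.toNat &&& b.toNat = (n.toNat % 2) * b.toNat := by
      rcases hb with h | h <;> subst h <;> simp [Nat.and_one_is_mod]
    rw [e5]; push_cast; ring
  · have hneg : ¬ (0:Int) ≤ n / 2 := by omega
    rw [bandneg n (b + 2*M) hn (by omega), bandneg (n/2) M hneg hM]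
    set a := (-n - 1).toNat with ha
    have e1 : (b + 2*M).toNat = b.toNat + 2 * M.toNat := by omega
    have e2 : (-(n/2) - 1).toNat = a / 2 := by omega
    rw [e1, e2, natN (b.toNat + 2 * M.toNat) a]
    have e3 : (b.toNat + 2 * M.toNat) % 2 = b.toNat := by omega
    have e4 : (b.toNat + 2 * M.toNat) / 2 = M.toNat := by omega
    rw [e3, e4]
    have hle : M.toNat &&& (a / 2) ≤ M.toNat := Nat.and_le_left
    rcases hb with h | h <;> subst h
    · simp only [PySem.Int.band_zero]
      have e5 : (0:Int).toNat = 0 := rfl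
      rw [e5]
      omega
    · rw [PySem.Int.band_one, PySem.Int.mod_eq_emod_of_pos (by norm_num)]
      have e5 : (1:Int).toNat = 1 := rfl
      rw [e5]
      omega

theorem band01 (n : Int) : PySem.Int.band n 1 = 0 ∨ PySem.Int.band n 1 = 1 := by
  rw [PySem.Int.band_one, PySem.Int.mod_eq_emod_of_pos (by norm_num)]
  omega

theorem char_of_toNat (c : Char) (d : Char) (h : c.toNat = d.toNat) : c = d := by
  have h1 := Char.ofNat_toNat c
  have h2 := Char.ofNat_toNat d
  rw [h] at h1
  exact h1.symm.trans h2

-- the core equivalence: A's loop over cs decides exactly (n & maskR cs) == valR cs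
theorem mainLoop (cs : List Char) (n : Int) :
    bitMatchLoop n cs = (PySem.Int.band n (maskR cs) == valR cs) := by
  induction cs generalizing n with
  | nil => simp [bitMatchLoop, maskR, valR]
  | cons c cs ih =>
    have hM := maskR_nonneg cs
    have hV := valR_nonneg cs
    have hb01 := band01 n
    simp only [bitMatchLoop, maskR, valR]
    by_cases h0 : c = '0' ∨ c = '1'
    · have hK := K1 n (maskR cs) 1 hM (Or.inr rfl)
      rw [if_pos h0, hK]
      rcases h0 with h | h <;> subst h
      · -- c = '0' : x = 0, the literal bit must be 0
        rw [Bool.eq_iff_iff]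
        rcases hb01 with hb | hb
        · simp [hb, ih]
        · simp [hb]
          omega
      · -- c = '1' : x = 1, the literal bit must be 1
        rw [Bool.eq_iff_iff]
        rcases hb01 with hb | hb
        · simp [hb]
          omega
        · simp [hb, ih]
    · -- wildcard: x ∉ {0,1}, A always continues, B masks the bit out
      have hc0 : ¬ c = '0' := fun h => h0 (Or.inl h)
      have hc1 : ¬ c = '1' := fun h => h0 (Or.inr h)
      have h48 : ('0').toNat = 48 := by decide
      have h49 : ('1').toNat = 49 := by decide
      have hx0 : ((c.toNat : Int) - 48) ≠ 0 := by
        intro h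
        exact hc0 (char_of_toNat c '0' (by omega))
      have hx1 : ((c.toNat : Int) - 48) ≠ 1 := by
        intro h
        exact hc1 (char_of_toNat c '1' (by omega))
      rw [if_pos (Or.inr ⟨hx0, hx1⟩), if_neg h0, if_neg hc1]
      have hK := K1 n (maskR cs) 0 hM (Or.inl rfl)
      rw [ih, hK, PySem.Int.band_zero, Bool.eq_iff_iff]
      simp only [beq_iff_eq]
      constructor <;> intro h <;> omega

theorem altEq (n : Int) (p : String) :
    bitMatch_alt n p = (PySem.Int.band n (maskR p.toList.reverse) == valR p.toList.reverse) := by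
  simp only [bitMatch_alt, foldB, zero_mul, zero_add]

theorem aEq (n : Int) (p : String) : bitMatch n p = bitMatchLoop n p.toList.reverse := by
  simp [bitMatch, PySem.Str.slice?_none_none_neg_one]

-- ===== VERDICT (by name: the statement is the Claim_ definition above) =====
theorem bitMatch_spec : Claim_equal_bitMatch := by
  intro pNum pPattern _
  show bitMatch pNum pPattern = bitMatch_alt pNum pPattern
  rw [aEq, mainLoop, altEq]
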